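-- pv_equiv track=rewrite | github.com/MrBrantCode/unitest_baseline | mut_generate/mist_train_taco/taco_2024/solution.py | simulate_cookie_operations
-- ===== SOURCE A (Python) =====
-- def simulate_cookie_operations(A: int, B: int, K: int) -> tuple:
--     for i in range(K):
--         if i % 2 == 0:
--             # Takahashi's turn
--             if A % 2 == 1:
--                 A -= 1
--             half_A = A // 2
--             A -= half_A
--             B += half_A
--         else:
--             # Aoki's turn
--             if B % 2 == 1:
--                 B -= 1
--             half_B = B // 2
--             B -= half_B
--             A += half_B
--     return (A, B)
-- ===== SOURCE B (Python) =====
-- def _taka(a, b):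
--     if a % 2 == 1:
--         a -= 1
--     h = a // 2
--     return (a - h, b + h)
--
--
-- def _aoki(a, b):
--     if b % 2 == 1:
--         b -= 1
--     h = b // 2
--     return (a + h, b - h)
--
--
-- def simulate_cookie_operations(A: int, B: int, K: int) -> tuple:
--     # Fast-forward: once one Takahashi+Aoki double-turn leaves the state
--     # unchanged, all remaining double-turns do too.
--     rem = K if K > 0 else 0
--     while rem >= 2:
--         a2, b2 = _aoki(*_taka(A, B))
--         if (a2, b2) == (A, B):
--             return _taka(A, B) if rem % 2 == 1 else (A, B)
--         A, B = a2, b2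
--         rem -= 2
--     if rem == 1:
--         return _taka(A, B)
--     return (A, B)
-- ===== Notes on version B (the rewrite author's own statement) =====
-- stated objective: faster
-- what changed: A simulates all K alternating turns one by one; B processes turns in Takahashi+Aoki pairs and, as soon as one double-turn leaves the state unchanged (which the halving dynamics reaches within O(log max(|A|,|B|)) pairs), fast-forwards all remaining turns by the parity of the remaining count.
import Mathlib
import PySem

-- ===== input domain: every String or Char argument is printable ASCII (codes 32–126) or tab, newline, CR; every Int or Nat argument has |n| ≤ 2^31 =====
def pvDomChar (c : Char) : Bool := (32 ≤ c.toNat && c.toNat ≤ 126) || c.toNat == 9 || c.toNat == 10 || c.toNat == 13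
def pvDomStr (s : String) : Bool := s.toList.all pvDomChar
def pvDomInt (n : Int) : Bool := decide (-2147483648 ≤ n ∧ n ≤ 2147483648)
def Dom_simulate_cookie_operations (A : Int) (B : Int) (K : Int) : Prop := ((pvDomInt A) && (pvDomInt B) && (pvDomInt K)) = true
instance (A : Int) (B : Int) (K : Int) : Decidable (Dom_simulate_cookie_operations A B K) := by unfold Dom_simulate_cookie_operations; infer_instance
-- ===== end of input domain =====

-- B replaces A's O(K) turn-by-turn loop by a double-turn loop that stops as soon as one
-- Takahashi+Aoki double-turn leaves the state unchanged (reached in O(log max(|A|,|B|)) steps)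
-- and fast-forwards the remaining turns by parity; objective: faster.

-- ===== PORT A =====
def simulate_cookie_operations (A : Int) (B : Int) (K : Int) : List Int :=
  let st := (PySem.List.pyRange 0 K 1).foldl (fun (s : Int × Int) i =>
    if PySem.Int.mod i 2 == 0 then
      -- Takahashi's turn
      let a := if PySem.Int.mod s.1 2 == 1 then s.1 - 1 else s.1
      let half_A := PySem.Int.floordiv a 2
      (a - half_A, s.2 + half_A)
    else
      -- Aoki's turn
      let b := if PySem.Int.mod s.2 2 == 1 then s.2 - 1 else s.2
      let half_B := PySem.Int.floordiv b 2
      (s.1 + half_B, b - half_B)) (A, B)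
  [st.1, st.2]

-- ===== PORT B =====
def pvTaka (a : Int) (b : Int) : Int × Int :=
  let a := if PySem.Int.mod a 2 == 1 then a - 1 else a
  let h := PySem.Int.floordiv a 2
  (a - h, b + h)

def pvAoki (a : Int) (b : Int) : Int × Int :=
  let b := if PySem.Int.mod b 2 == 1 then b - 1 else b
  let h := PySem.Int.floordiv b 2
  (a + h, b - h)

-- the `while rem >= 2` loop of Source B, structural recursion on the remaining turn count
def pvLoop (A : Int) (B : Int) : Nat → Int × Int
  | 0 => (A, B)
  | 1 => pvTaka A B
  | (n + 2) =>
    let p := pvTaka A B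
    let q := pvAoki p.1 p.2
    if q = (A, B) then
      if (n + 2) % 2 == 1 then pvTaka A B else (A, B)
    else pvLoop q.1 q.2 n

def simulate_cookie_operations_alt (A : Int) (B : Int) (K : Int) : List Int :=
  let st := pvLoop A B (if 0 < K then K.toNat else 0)
  [st.1, st.2]

-- ===== PRECONDITION & SPEC =====
def Spec_simulate_cookie_operations (A : Int) (B : Int) (K : Int) (out : List Int) : Prop := out = simulate_cookie_operations_alt A B K
instance (A : Int) (B : Int) (K : Int) (out : List Int) : Decidable (Spec_simulate_cookie_operations A B K out) := by unfold Spec_simulate_cookie_operations; infer_instance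

-- ===== CLAIM (what is proved, stated in full; the proofs are below) =====
def Claim_equal_simulate_cookie_operations : Prop := ∀ (A : Int) (B : Int) (K : Int), Dom_simulate_cookie_operations A B K → Spec_simulate_cookie_operations A B K (simulate_cookie_operations A B K)

-- ===== LEMMAS AND PROOFS =====

-- alternating simulation: `p = false` means it is Takahashi's turn
def pvGsim : Nat → Bool → Int × Int → Int × Int
  | 0, _, s => s
  | (n + 1), p, s => pvGsim n (!p) (if p then pvAoki s.1 s.2 else pvTaka s.1 s.2)

theorem pvGsim_two (n : Nat) (s : Int × Int) :
    pvGsim (n + 2) false s = pvGsim n false (pvAoki (pvTaka s.1 s.2).1 (pvTaka s.1 s.2).2) := by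
  simp [pvGsim]

-- A's foldl over range(i, i+n) equals the alternating simulation started at parity i % 2
theorem pvFold_eq_gsim (n : Nat) : ∀ (i : Int) (s : Int × Int), 0 ≤ i →
    (PySem.List.pyRange i (i + n) 1).foldl (fun (s : Int × Int) i =>
      if PySem.Int.mod i 2 == 0 then
        let a := if PySem.Int.mod s.1 2 == 1 then s.1 - 1 else s.1
        let half_A := PySem.Int.floordiv a 2
        (a - half_A, s.2 + half_A)
      else
        let b := if PySem.Int.mod s.2 2 == 1 then s.2 - 1 else s.2
        let half_B := PySem.Int.floordiv b 2
        (s.1 + half_B, b - half_B)) s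
    = pvGsim n (PySem.Int.mod i 2 == 1) s := by
  induction n with
  | zero => intro i s hi; simp [pvGsim]
  | succ m ih =>
    intro i s hi
    push_cast
    rw [PySem.List.pyRange_one_cons (by omega : i < i + (m + 1))]
    rw [List.foldl_cons]
    have hmod : PySem.Int.mod i 2 = i % 2 := PySem.Int.mod_eq_emod_of_pos (by omega)
    have hmod' : PySem.Int.mod (i + 1) 2 = (i + 1) % 2 := PySem.Int.mod_eq_emod_of_pos (by omega)
    have h2 : i % 2 = 0 ∨ i % 2 = 1 := Int.emod_two_eq_zero_or_one i
    have := ih (i + 1) (if PySem.Int.mod i 2 == 0 then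
        let a := if PySem.Int.mod s.1 2 == 1 then s.1 - 1 else s.1
        let half_A := PySem.Int.floordiv a 2
        (a - half_A, s.2 + half_A)
      else
        let b := if PySem.Int.mod s.2 2 == 1 then s.2 - 1 else s.2
        let half_B := PySem.Int.floordiv b 2
        (s.1 + half_B, b - half_B)) (by omega)
    push_cast at this
    rw [show i + (↑m + 1) = i + 1 + ↑m by ring]
    rw [this]
    rcases h2 with h | h
    · have hb : (PySem.Int.mod i 2 == 0) = true := by simp [h]
      have hb1 : (PySem.Int.mod (i + 1) 2 == 1) = true := by simp; omega
      have hb0 : (PySem.Int.mod i 2 == 1) = false := by simp [h]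
      simp only [hb, hb1, hb0, if_true, pvGsim, Bool.not_false]
      simp [pvTaka]
    · have hb : (PySem.Int.mod i 2 == 0) = false := by simp [h]
      have hb1 : (PySem.Int.mod (i + 1) 2 == 1) = false := by simp; omega
      have hb0 : (PySem.Int.mod i 2 == 1) = true := by simp [h]
      simp only [hb, hb1, hb0, pvGsim, Bool.not_true]
      simp [pvAoki]

-- once a double turn fixes the state, the remaining simulation depends only on the parity
theorem pvGsim_of_fix (s : Int × Int)
    (hfix : pvAoki (pvTaka s.1 s.2).1 (pvTaka s.1 s.2).2 = s) :
    ∀ n, pvGsim n false s = if n % 2 == 1 then pvTaka s.1 s.2 else s := by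
  intro n
  induction n using Nat.twoStepInduction with
  | zero => simp [pvGsim]
  | one => simp [pvGsim]
  | more m ih _ =>
    rw [pvGsim_two, hfix, ih]
    have : (m + 2) % 2 = m % 2 := by omega
    rw [this]

theorem pvGsim_eq_pvLoop (n : Nat) : ∀ (A B : Int), pvGsim n false (A, B) = pvLoop A B n := by
  induction n using Nat.twoStepInduction with
  | zero => intro A B; simp [pvGsim, pvLoop]
  | one => intro A B; simp [pvGsim, pvLoop, pvTaka]
  | more m ih _ =>
    intro A B
    rw [pvLoop]
    by_cases h : pvAoki (pvTaka A B).1 (pvTaka A B).2 = (A, B)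
    · simp only [h, if_true]
      exact pvGsim_of_fix (A, B) h (m + 2)
    · simp only [h, if_false]
      rcases hq : pvAoki (pvTaka A B).1 (pvTaka A B).2 with ⟨a2, b2⟩
      rw [pvGsim_two, hq]
      simpa using ih a2 b2

-- ===== VERDICT (by name: the statement is the Claim_ definition above) =====
theorem simulate_cookie_operations_spec : Claim_equal_simulate_cookie_operations := by
  intro A B K _
  unfold Spec_simulate_cookie_operations simulate_cookie_operations simulate_cookie_operations_alt
  by_cases hK : 0 < K
  · have hn : (0 : Int) + (K.toNat : Int) = K := by omega
    rw [show PySem.List.pyRange 0 K 1 = PySem.List.pyRange 0 (0 + (K.toNat : Int)) 1 by rw [hn]]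
    rw [pvFold_eq_gsim K.toNat 0 (A, B) le_rfl]
    rw [show (PySem.Int.mod 0 2 == 1) = false from rfl]
    rw [pvGsim_eq_pvLoop]
    simp only [if_pos hK]
  · rw [PySem.List.pyRange_one_eq_nil (by omega)]
    simp [hK, pvLoop]
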